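-- pv_equiv track=rewrite | github.com/shhuan1989/algorithms | codeforces/1343D.py | solve
-- ===== SOURCE A (Python) =====
-- import collections
--
-- def solve(N, K, A):
--
--     M = 2 * K + 1
--     x = [0 for _ in range(M)]
--
--     add = [0 for _ in range(M)]
--     minus = [0 for _ in range(M)]
--     wc = collections.defaultdict(int)
--     for i in range(N//2):
--         a, b = A[i], A[N-i-1]
--         wc[a+b] += 1
--         s, t = min(a, b) + 1, max(a, b) + K + 1
--         if s < M:
--             add[s] += 1
--         if t < M:
--             minus[t] += 1
--
--     s = 0
--     for i in range(M):
--         s += add[i]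
--         s -= minus[i]
--         x[i] = s
--
--     ans = N
--     for target in range(2, M):
--         one = x[target] - wc[target]
--         two = N//2-wc[target]-one
--         ans = min(ans, one + 2 * two)
--
--     return ans
-- ===== SOURCE B (Python) =====
-- import collections
--
-- def solve(N, K, A):
--     pairs = N // 2
--     M = 2 * K + 1
--     exact = collections.Counter()
--     los, his = [], []
--     for i in range(pairs):
--         a, b = A[i], A[N - i - 1]
--         exact[a + b] += 1
--         los.append(min(a, b) + 1)
--         his.append(max(a, b) + K)
--     los.sort()
--     his.sort()
--     best = N
--     i = j = 0
--     for t in range(2, M):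
--         while i < len(los) and los[i] <= t:
--             i += 1
--         while j < len(his) and his[j] < t:
--             j += 1
--         best = min(best, 2 * pairs - (i - j) - exact[t])
--     return best
-- ===== Notes on version B (the rewrite author's own statement) =====
-- stated objective: alternative
-- what changed: B drops A's value-indexed difference arrays, the prefix-sum pass and the one/two split: it collects the pair boundaries min+1 and max+K into two lists, sorts them, sweeps the targets 2..2K advancing two pointers to count covering pairs, and credits exact sums from a Counter, minimising 2*(N//2) - cover - exact directly.
-- outside the precondition, e.g. on solve(4, 3, [-3, 1, 1, 3]): A returns 2, B returns 1
import Mathlib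
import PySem

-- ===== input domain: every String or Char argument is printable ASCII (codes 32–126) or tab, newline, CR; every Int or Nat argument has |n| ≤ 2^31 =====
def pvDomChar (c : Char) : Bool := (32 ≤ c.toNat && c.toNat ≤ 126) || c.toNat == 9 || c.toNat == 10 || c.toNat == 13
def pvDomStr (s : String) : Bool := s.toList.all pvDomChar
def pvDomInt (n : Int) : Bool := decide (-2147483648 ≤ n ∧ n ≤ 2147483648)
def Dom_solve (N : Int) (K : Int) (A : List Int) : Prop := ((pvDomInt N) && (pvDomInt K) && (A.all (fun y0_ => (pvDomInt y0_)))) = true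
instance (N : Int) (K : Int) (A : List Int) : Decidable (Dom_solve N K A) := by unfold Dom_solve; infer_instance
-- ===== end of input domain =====

-- B replaces A's value-indexed difference arrays and prefix-sum sweep by two sorted
-- boundary lists advanced with two pointers plus a Counter of exact pair sums (alternative
-- decomposition, same asymptotic cost); equal to A on Pre_solve.

-- ===== PORT A =====
-- loop body of A's first 'for i in range(N//2)' loop, state = (add, minus, wc)
def pvStepA (N : Int) (K : Int) (A : List Int)
    (st : List Int × List Int × PySem.Dict Int Int) (i : Int) :
    List Int × List Int × PySem.Dict Int Int :=
  let a := PySem.List.pyGetD A i 0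
  let b := PySem.List.pyGetD A (N - i - 1) 0
  -- wc[a+b] += 1 on a defaultdict(int)
  let wc := st.2.2.modify (a + b) 0 (· + 1)
  let s := min a b + 1
  let t := max a b + K + 1
  let add := if s < 2 * K + 1 then PySem.List.pySetD st.1 s (PySem.List.pyGetD st.1 s 0 + 1) else st.1
  let minus := if t < 2 * K + 1 then PySem.List.pySetD st.2.1 t (PySem.List.pyGetD st.2.1 t 0 + 1) else st.2.1
  (add, minus, wc)

def solve (N : Int) (K : Int) (A : List Int) : Int :=
  let M := 2 * K + 1
  let x := List.replicate M.toNat (0 : Int)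
  let st := (PySem.List.pyRange 0 (PySem.Int.floordiv N 2) 1).foldl (pvStepA N K A)
    (List.replicate M.toNat (0 : Int), List.replicate M.toNat (0 : Int), PySem.Dict.empty)
  let st2 := (PySem.List.pyRange 0 M 1).foldl
    (fun (p : Int × List Int) i =>
      let s := p.1 + PySem.List.pyGetD st.1 i 0 - PySem.List.pyGetD st.2.1 i 0
      (s, PySem.List.pySetD p.2 i s))
    ((0 : Int), x)
  -- 'wc[target]' reads a defaultdict: value 0 when absent (the silent key insertion
  -- cannot affect the returned value), ported as getD _ _ 0
  (PySem.List.pyRange 2 M 1).foldl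
    (fun ans target =>
      let one := PySem.List.pyGetD st2.2 target 0 - st.2.2.getD target 0
      let two := PySem.Int.floordiv N 2 - st.2.2.getD target 0 - one
      min ans (one + 2 * two))
    N

-- ===== PORT B =====
-- 'while i < len(xs) and p(xs[i]): i += 1' of Source B
def pvAdv (p : Int → Bool) (xs : List Int) (i : Nat) : Nat :=
  if h : i < xs.length then
    if p xs[i] then pvAdv p xs (i + 1) else i
  else i
termination_by xs.length - i

-- loop body of B's first loop, state = (exact, los, his)
def pvStepB (N : Int) (K : Int) (A : List Int)
    (st : PySem.Dict Int Int × List Int × List Int) (i : Int) :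
    PySem.Dict Int Int × List Int × List Int :=
  let a := PySem.List.pyGetD A i 0
  let b := PySem.List.pyGetD A (N - i - 1) 0
  (st.1.modify (a + b) 0 (· + 1), st.2.1 ++ [min a b + 1], st.2.2 ++ [max a b + K])

def solve_alt (N : Int) (K : Int) (A : List Int) : Int :=
  let pairs := PySem.Int.floordiv N 2
  let M := 2 * K + 1
  let st := (PySem.List.pyRange 0 pairs 1).foldl (pvStepB N K A) (PySem.Dict.empty, [], [])
  let los := PySem.List.sorted st.2.1 (fun v => v) false
  let his := PySem.List.sorted st.2.2 (fun v => v) false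
  let r := (PySem.List.pyRange 2 M 1).foldl
    (fun (q : Int × Nat × Nat) t =>
      let i := pvAdv (fun v => decide (v ≤ t)) los q.2.1
      let j := pvAdv (fun v => decide (v < t)) his q.2.2
      (min q.1 (2 * pairs - ((i : Int) - (j : Int)) - st.1.getD t 0), i, j))
    (N, 0, 0)
  r.1

-- ===== PRECONDITION & SPEC =====
-- the symmetric pairs (A[i], A[N-i-1]) the Python loop reads
def pvPairs (N : Int) (A : List Int) : List (Int × Int) :=
  (PySem.List.pyRange 0 (PySem.Int.floordiv N 2) 1).map
    (fun i => (PySem.List.pyGetD A i 0, PySem.List.pyGetD A (N - i - 1) 0))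

-- Pre_ keeps to inputs where A's value-indexed difference arrays are indexed sanely: it
-- excludes N > len(A) (A raises IndexError) and pairs whose boundary index min+1 or
-- max+K+1 is negative while below 2K+1 (outside the problem's domain 1 ≤ A[i] ≤ K;
-- there A either raises IndexError or silently wraps a negative index).
def Pre_solve (N : Int) (K : Int) (A : List Int) : Prop :=
  (2 ≤ N → N ≤ (A.length : Int)) ∧
  ∀ p ∈ pvPairs N A,
    (min p.1 p.2 + 1 < 2 * K + 1 → 0 ≤ min p.1 p.2 + 1) ∧
    (max p.1 p.2 + K + 1 < 2 * K + 1 → 0 ≤ max p.1 p.2 + K + 1)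

instance (N : Int) (K : Int) (A : List Int) : Decidable (Pre_solve N K A) := by
  unfold Pre_solve; infer_instance

def pvWitness_solve : Int × Int × List Int := (4, 2, [1, 2, 2, 1])

def Spec_solve (N : Int) (K : Int) (A : List Int) (out : Int) : Prop := out = solve_alt N K A
instance (N : Int) (K : Int) (A : List Int) (out : Int) : Decidable (Spec_solve N K A out) := by
  unfold Spec_solve; infer_instance

-- ===== CLAIM (what is proved, stated in full; the proofs are below) =====
def Claim_equal_solve : Prop := ∀ (N : Int) (K : Int) (A : List Int),
  Dom_solve N K A → Pre_solve N K A → Spec_solve N K A (solve N K A)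

-- ===== LEMMAS AND PROOFS =====

-- the common canonical value both ports are reduced to
def pvCanon (N : Int) (K : Int) (A : List Int) : Int :=
  (PySem.List.pyRange 2 (2 * K + 1) 1).foldl
    (fun ans t => min ans (2 * PySem.Int.floordiv N 2
      - (((pvPairs N A).countP (fun p => decide (min p.1 p.2 + 1 <= t)) : Int)
         - ((pvPairs N A).countP (fun p => decide (max p.1 p.2 + K + 1 <= t)) : Int))
      - ((pvPairs N A).countP (fun p => p.1 + p.2 == t) : Int)))
    N

-- ---------- shared: the counting dict ----------

theorem pv_wc_count (L : List (Int × Int)) :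
    ∀ (d : PySem.Dict Int Int) (t : Int),
      ((L.foldl (fun d p => PySem.Dict.modify d (p.1 + p.2) 0 (· + 1)) d).getD t 0)
        = d.getD t 0 + (L.countP (fun p => p.1 + p.2 == t) : Int) := by
  induction L with
  | nil => intro d t; simp
  | cons p L ih =>
      intro d t
      rw [List.foldl_cons, ih, List.countP_cons, PySem.Dict.getD_modify]
      by_cases h : p.1 + p.2 = t
      · simp [h]; ring
      · have hb : (p.1 + p.2 == t) = false := by simp [h]
        rw [hb]
        rw [if_neg (fun hc => h hc.symm)]
        simp

-- ---------- A side ----------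

-- one difference-array update of A, over a pair, parametrised by the boundary function f
def pvBStep (K : Int) (f : Int × Int → Int) (u : List Int) (p : Int × Int) : List Int :=
  if f p < 2 * K + 1 then PySem.List.pySetD u (f p) (PySem.List.pyGetD u (f p) 0 + 1) else u

theorem pv_foldA_eq (N K : Int) (A : List Int) :
    ∀ (L : List Int) (u v : List Int) (d : PySem.Dict Int Int),
      L.foldl (pvStepA N K A) (u, v, d)
        = ((L.map (fun i => (PySem.List.pyGetD A i 0, PySem.List.pyGetD A (N - i - 1) 0))).foldl
              (pvBStep K (fun p => min p.1 p.2 + 1)) u,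
           (L.map (fun i => (PySem.List.pyGetD A i 0, PySem.List.pyGetD A (N - i - 1) 0))).foldl
              (pvBStep K (fun p => max p.1 p.2 + K + 1)) v,
           (L.map (fun i => (PySem.List.pyGetD A i 0, PySem.List.pyGetD A (N - i - 1) 0))).foldl
              (fun d p => PySem.Dict.modify d (p.1 + p.2) 0 (· + 1)) d) := by
  intro L
  induction L with
  | nil => intro u v d; rfl
  | cons i L ih =>
      intro u v d
      simp only [List.foldl_cons, List.map_cons, ih]
      rfl

def pvSumTo (xs : List Int) (n : Nat) : Int := (xs.take n).sum

theorem pv_sum_take_set (xs : List Int) :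
    ∀ (k : Nat) (v : Int) (n : Nat) (hk : k < xs.length),
      pvSumTo (xs.set k v) n = pvSumTo xs n + (if k < n then v - xs[k] else 0) := by
  induction xs with
  | nil => intro k v n hk; simp at hk
  | cons x tl ih =>
      intro k v n hk
      cases k with
      | zero =>
          cases n with
          | zero => simp [pvSumTo]
          | succ m => simp [pvSumTo, List.set_cons_zero]; ring
      | succ k =>
          cases n with
          | zero => simp [pvSumTo]
          | succ m =>
              have hk' : k < tl.length := by simpa using hk
              have := ih k v m hk'
              simp only [List.set_cons_succ, pvSumTo, List.take_succ_cons, List.sum_cons] at *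
              rw [this]
              by_cases hkm : k < m
              · rw [if_pos hkm, if_pos (by omega)]
                simp only [List.getElem_cons_succ]
                ring
              · rw [if_neg hkm, if_neg (by omega)]; ring

theorem pv_sumTo_succ (xs : List Int) (n : Nat) (h : n < xs.length) :
    pvSumTo xs (n + 1) = pvSumTo xs n + xs[n] := by
  unfold pvSumTo
  rw [List.take_add_one, List.getElem?_eq_getElem h]
  rw [List.sum_append]
  simp

theorem pv_length_foldB (K : Int) (f : Int × Int → Int) :
    ∀ (L : List (Int × Int)) (u : List Int), (L.foldl (pvBStep K f) u).length = u.length := by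
  intro L
  induction L with
  | nil => intro u; rfl
  | cons p L ih =>
      intro u
      rw [List.foldl_cons, ih]
      unfold pvBStep
      split
      · exact PySem.List.length_pySetD u _ _
      · rfl

theorem pv_add_count (K : Int) (f : Int × Int → Int) :
    ∀ (L : List (Int × Int)) (u : List Int),
      u.length = (2 * K + 1).toNat →
      (∀ p ∈ L, f p < 2 * K + 1 → 0 ≤ f p) →
      ∀ n : Nat, (n : Int) ≤ 2 * K + 1 →
        pvSumTo (L.foldl (pvBStep K f) u) n
          = pvSumTo u n + (L.countP (fun p => decide (f p < (n : Int))) : Int) := by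
  intro L
  induction L with
  | nil => intro u _ _ n _; simp
  | cons p L ih =>
      intro u hlen hgood n hn
      rw [List.foldl_cons, List.countP_cons]
      have hulen : (L.foldl (pvBStep K f) (pvBStep K f u p)).length = (pvBStep K f u p).length :=
        pv_length_foldB K f L _
      have hstep : pvSumTo (pvBStep K f u p) n
          = pvSumTo u n + (if decide (f p < (n : Int)) then (1:Int) else 0) := by
        unfold pvBStep
        by_cases hf : f p < 2 * K + 1
        · rw [if_pos hf]
          have h0 : 0 ≤ f p := hgood p List.mem_cons_self hf
          have hMpos : 0 ≤ 2 * K + 1 := le_trans h0 (le_of_lt hf)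
          have hlt : (f p).toNat < u.length := by
            rw [hlen]; omega
          have hget : PySem.List.pyGetD u (f p) 0 = u[(f p).toNat] :=
            PySem.List.pyGetD_eq_getElem u 0 h0 (by omega)
          rw [PySem.List.pySetD_of_nonneg _ _ h0, hget,
            pv_sum_take_set u (f p).toNat _ n hlt]
          by_cases hfn : f p < (n : Int)
          · have h1 : (f p).toNat < n := by omega
            simp [hfn, h1]
          · have h1 : ¬ (f p).toNat < n := by omega
            simp [hfn, h1]
        · rw [if_neg hf]
          have : ¬ (f p < (n : Int)) := by omega
          rw [if_neg (by simpa using this)]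
          ring
      have hgood' : ∀ q ∈ L, f q < 2 * K + 1 → 0 ≤ f q := fun q hq => hgood q (List.mem_cons_of_mem _ hq)
      have hlen' : (pvBStep K f u p).length = (2 * K + 1).toNat := by
        unfold pvBStep
        split
        · rw [PySem.List.length_pySetD]; exact hlen
        · exact hlen
      rw [ih (pvBStep K f u p) hlen' hgood' n hn, hstep]
      push_cast
      ring

theorem pv_getD_setD (x : List Int) (i t v : Int) (h0 : 0 ≤ i) (_hi : i < (x.length : Int))
    (h0t : 0 ≤ t) (ht : t < (x.length : Int)) :
    PySem.List.pyGetD (PySem.List.pySetD x i v) t 0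
      = if t = i then v else PySem.List.pyGetD x t 0 := by
  rw [PySem.List.pySetD_of_nonneg _ _ h0]
  rw [PySem.List.pyGetD_eq_getElem _ 0 h0t (by simp; omega)]
  rw [List.getElem_set]
  by_cases hti : t = i
  · rw [if_pos (by omega), if_pos hti]
  · rw [if_neg (by omega), if_neg hti, PySem.List.pyGetD_eq_getElem x 0 h0t (by omega)]

-- the prefix-sum loop of A writes running sums into x
theorem pv_prefix (M : Int) (add minus : List Int)
    (hadd : (add.length : Int) = M) (hminus : (minus.length : Int) = M) :
    ∀ (n : Nat) (a : Int), (M - a).toNat = n → 0 ≤ a →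
      ∀ (s : Int) (x : List Int), (x.length : Int) = M →
        s = pvSumTo add a.toNat - pvSumTo minus a.toNat →
        ∀ (t : Int), 0 ≤ t → t < M →
          PySem.List.pyGetD
            ((PySem.List.pyRange a M 1).foldl
              (fun (p : Int × List Int) i =>
                (p.1 + PySem.List.pyGetD add i 0 - PySem.List.pyGetD minus i 0,
                 PySem.List.pySetD p.2 i (p.1 + PySem.List.pyGetD add i 0 - PySem.List.pyGetD minus i 0)))
              (s, x)).2 t 0
          = if t < a then PySem.List.pyGetD x t 0
            else pvSumTo add (t + 1).toNat - pvSumTo minus (t + 1).toNat := by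
  intro n
  induction n with
  | zero =>
      intro a h0n ha s x hxlen hs t ht0 htM
      rw [PySem.List.pyRange_one_eq_nil (by omega)]
      rw [if_pos (by omega)]
      rfl
  | succ n ih =>
      intro a h0n ha s x hxlen hs t ht0 htM
      have haM : a < M := by omega
      rw [PySem.List.pyRange_one_cons haM, List.foldl_cons]
      have hsa : PySem.List.pyGetD add a 0 = add[a.toNat]'(by omega) :=
        PySem.List.pyGetD_eq_getElem add 0 ha (by omega)
      have hsm : PySem.List.pyGetD minus a 0 = minus[a.toNat]'(by omega) :=
        PySem.List.pyGetD_eq_getElem minus 0 ha (by omega)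
      have hs' : s + PySem.List.pyGetD add a 0 - PySem.List.pyGetD minus a 0
          = pvSumTo add (a + 1).toNat - pvSumTo minus (a + 1).toNat := by
        have h1 : (a + 1).toNat = a.toNat + 1 := by omega
        rw [h1, pv_sumTo_succ add a.toNat (by omega), pv_sumTo_succ minus a.toNat (by omega),
          hs, hsa, hsm]
        ring
      have ihx := ih (a + 1) (by omega) (by omega)
        (s + PySem.List.pyGetD add a 0 - PySem.List.pyGetD minus a 0)
        (PySem.List.pySetD x a (s + PySem.List.pyGetD add a 0 - PySem.List.pyGetD minus a 0))
        (by rw [PySem.List.length_pySetD]; exact hxlen) hs' t ht0 htM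
      rw [ihx]
      by_cases hta : t < a
      · rw [if_pos (by omega), if_pos hta,
          pv_getD_setD x a t _ ha (by omega) ht0 (by omega), if_neg (by omega)]
      · by_cases hta2 : t = a
        · rw [if_pos (by omega), if_neg (by omega),
            pv_getD_setD x a t _ ha (by omega) ht0 (by omega), if_pos hta2, hs', hta2]
        · rw [if_neg (by omega), if_neg (by omega)]

theorem pv_A_eq_canon (N K : Int) (A : List Int) (h : Pre_solve N K A) :
    solve N K A = pvCanon N K A := by
  obtain ⟨-, hgood⟩ := h
  simp only [solve]
  rw [pv_foldA_eq N K A _ (List.replicate (2 * K + 1).toNat (0 : Int))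
    (List.replicate (2 * K + 1).toNat (0 : Int)) PySem.Dict.empty]
  simp only [pvCanon]
  apply PySem.List.foldl_congr_mem
  intro acc t ht
  rw [PySem.List.mem_pyRange_one] at ht
  obtain ⟨ht2, htM⟩ := ht
  simp only [pvPairs] at hgood
  set Lp := List.map (fun i => (PySem.List.pyGetD A i 0, PySem.List.pyGetD A (N - i - 1) 0))
    (PySem.List.pyRange 0 (PySem.Int.floordiv N 2) 1) with hLp
  set addF := List.foldl (pvBStep K fun p => min p.1 p.2 + 1)
    (List.replicate (2 * K + 1).toNat 0) Lp with haddF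
  set minusF := List.foldl (pvBStep K fun p => max p.1 p.2 + K + 1)
    (List.replicate (2 * K + 1).toNat 0) Lp with hminusF
  set wcF := List.foldl (fun d p => PySem.Dict.modify d (p.1 + p.2) 0 (· + 1))
    (PySem.Dict.empty : PySem.Dict Int Int) Lp with hwcF
  have hlena : (addF.length : Int) = 2 * K + 1 := by
    rw [haddF, pv_length_foldB]; simp; omega
  have hlenm : (minusF.length : Int) = 2 * K + 1 := by
    rw [hminusF, pv_length_foldB]; simp; omega
  have hx := pv_prefix (2 * K + 1) addF minusF hlena hlenm (2 * K + 1).toNat 0 (by omega) (by omega)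
    0 (List.replicate (2 * K + 1).toNat 0) (by simp; omega) (by simp [pvSumTo]) t (by omega) (by omega)
  rw [if_neg (by omega)] at hx
  rw [hx]
  have hca := pv_add_count K (fun p => min p.1 p.2 + 1) Lp (List.replicate (2 * K + 1).toNat 0)
    (by simp) (fun p hp hlt => (hgood p hp).1 hlt) (t + 1).toNat (by omega)
  have hcm := pv_add_count K (fun p => max p.1 p.2 + K + 1) Lp (List.replicate (2 * K + 1).toNat 0)
    (by simp) (fun p hp hlt => (hgood p hp).2 hlt) (t + 1).toNat (by omega)
  beta_reduce at hca hcm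
  rw [← haddF] at hca
  rw [← hminusF] at hcm
  have hcast : (((t + 1).toNat : Nat) : Int) = t + 1 := by omega
  rw [hcast] at hca hcm
  have hrep : pvSumTo (List.replicate (2 * K + 1).toNat (0 : Int)) (t + 1).toNat = 0 := by
    simp [pvSumTo]
  rw [hrep] at hca hcm
  have hcw := pv_wc_count Lp PySem.Dict.empty t
  simp only [← hwcF] at hcw
  have hemp : (PySem.Dict.empty : PySem.Dict Int Int).getD t 0 = 0 := by simp
  rw [hemp] at hcw
  rw [hca, hcm]
  simp only [hcw]
  have hc1 : Lp.countP (fun p => decide (min p.1 p.2 + 1 < t + 1))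
      = Lp.countP (fun p => decide (min p.1 p.2 + 1 ≤ t)) := by
    apply List.countP_congr
    intro p _
    simp only [decide_eq_true_eq]
    omega
  have hc2 : Lp.countP (fun p => decide (max p.1 p.2 + K + 1 < t + 1))
      = Lp.countP (fun p => decide (max p.1 p.2 + K + 1 ≤ t)) := by
    apply List.countP_congr
    intro p _
    simp only [decide_eq_true_eq]
    omega
  rw [hc1, hc2]
  congr 1
  simp only [pvPairs]
  rw [← hLp]
  omega

-- ---------- B side ----------

theorem pv_foldB_eq (N K : Int) (A : List Int) :
    ∀ (L : List Int) (d : PySem.Dict Int Int) (u v : List Int),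
      L.foldl (pvStepB N K A) (d, u, v)
        = ((L.map (fun i => (PySem.List.pyGetD A i 0, PySem.List.pyGetD A (N - i - 1) 0))).foldl
              (fun d p => PySem.Dict.modify d (p.1 + p.2) 0 (· + 1)) d,
           u ++ (L.map (fun i => (PySem.List.pyGetD A i 0, PySem.List.pyGetD A (N - i - 1) 0))).map
              (fun p => min p.1 p.2 + 1),
           v ++ (L.map (fun i => (PySem.List.pyGetD A i 0, PySem.List.pyGetD A (N - i - 1) 0))).map
              (fun p => max p.1 p.2 + K)) := by
  intro L
  induction L with
  | nil => intro d u v; simp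
  | cons i L ih =>
      intro d u v
      simp only [List.foldl_cons, List.map_cons, ih, pvStepB, List.map_cons, List.cons_append,
        List.append_assoc]
      rfl

-- a Bool predicate that is downward closed along a sorted list
theorem pv_countP_eq_of_pos_iff (xs : List Int) (p : Int → Bool) :
    ∀ (i : Nat), i ≤ xs.length →
      (∀ (k : Nat) (hk : k < xs.length), p xs[k] = decide (k < i)) →
      xs.countP p = i := by
  induction xs with
  | nil => intro i hi _; simpa using (Nat.le_zero.mp hi).symm
  | cons x tl ih =>
      intro i hi h
      rw [List.countP_cons]
      cases i with
      | zero =>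
          have hx : p x = false := by simpa using h 0 (by simp)
          rw [hx, ih 0 (by omega) (fun k hk => by simpa using h (k + 1) (by simpa using hk))]
          simp
      | succ m =>
          have hx : p x = true := by simpa using h 0 (by simp)
          have htl : tl.countP p = m := by
            apply ih m (by simpa using hi)
            intro k hk
            have := h (k + 1) (by simpa using hk)
            simpa using this
          rw [hx, htl]
          simp

theorem pv_pos_of_lt_countP (xs : List Int) (hs : xs.Pairwise (· ≤ ·)) (p : Int → Bool)
    (hdc : ∀ u v : Int, u ≤ v → p v = true → p u = true) :
    ∀ (k : Nat) (_hk : k < xs.countP p), p (xs.getD k 0) = true := by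
  induction xs with
  | nil => intro k hk; simp at hk
  | cons x tl ih =>
      intro k hk
      have hx : ∀ y ∈ tl, x ≤ y := fun y hy => (List.pairwise_cons.mp hs).1 y hy
      have htl : tl.Pairwise (· ≤ ·) := (List.pairwise_cons.mp hs).2
      by_cases hpx : p x = true
      · cases k with
        | zero => simpa using hpx
        | succ m =>
            apply ih htl m
            rw [List.countP_cons, hpx] at hk
            simp at hk
            omega
      · have h0 : tl.countP p = 0 := by
          rw [List.countP_eq_zero]
          intro y hy hpy
          exact hpx (hdc x y (hx y hy) hpy)
        rw [List.countP_cons, h0] at hk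
        simp [hpx] at hk

theorem pv_adv_eq (xs : List Int) (hs : xs.Pairwise (· ≤ ·)) (p : Int → Bool)
    (hdc : ∀ u v : Int, u ≤ v → p v = true → p u = true) :
    ∀ (m i : Nat), xs.length - i = m → i ≤ xs.length →
      (∀ k : Nat, k < i → p (xs.getD k 0) = true) →
      pvAdv p xs i = xs.countP p := by
  intro m
  induction m with
  | zero =>
      intro i hm hi hpre
      unfold pvAdv
      rw [dif_neg (by omega)]
      symm
      apply pv_countP_eq_of_pos_iff xs p i hi
      intro k hk
      have h1 : p xs[k] = true := by
        have := hpre k (by omega)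
        rwa [List.getD_eq_getElem _ _ hk] at this
      rw [h1]
      simp
      omega
  | succ m ih =>
      intro i hm hi hpre
      unfold pvAdv
      rw [dif_pos (by omega)]
      by_cases hp : p (xs[i]'(by omega)) = true
      · rw [if_pos hp]
        apply ih (i + 1) (by omega) (by omega)
        intro k hk
        rcases Nat.lt_succ_iff_lt_or_eq.mp hk with h | h
        · exact hpre k h
        · subst h
          rwa [List.getD_eq_getElem _ _ (by omega)]
      · rw [if_neg hp]
        symm
        apply pv_countP_eq_of_pos_iff xs p i hi
        intro k hk
        by_cases hki : k < i
        · have h1 : p xs[k] = true := by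
            have := hpre k hki
            rwa [List.getD_eq_getElem _ _ hk] at this
          rw [h1]
          simp [hki]
        · have h2 : p xs[k] = false := by
            by_cases hke : k = i
            · subst hke; simpa using hp
            · have hik : i < k := by omega
              have hle : xs[i]'(by omega) ≤ xs[k] :=
                List.pairwise_iff_getElem.mp hs i k (by omega) hk hik
              rcases Bool.eq_false_or_eq_true (p xs[k]) with h | h
              · exact absurd (hdc _ _ hle h) (by simpa using hp)
              · exact h
          rw [h2]
          simp [hki]

theorem pv_sweep (M P : Int) (E : PySem.Dict Int Int) (los his : List Int)
    (hlos : los.Pairwise (· ≤ ·)) (hhis : his.Pairwise (· ≤ ·)) :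
    ∀ (n : Nat) (a : Int), (M - a).toNat = n →
      ∀ (i0 j0 : Nat) (ans : Int), i0 ≤ los.length → j0 ≤ his.length →
        (∀ k : Nat, k < i0 → los.getD k 0 < a) →
        (∀ k : Nat, k < j0 → his.getD k 0 < a) →
        ((PySem.List.pyRange a M 1).foldl
          (fun (q : Int × Nat × Nat) t =>
            (min q.1 (2 * P - (((pvAdv (fun v => decide (v ≤ t)) los q.2.1 : Nat) : Int)
                 - ((pvAdv (fun v => decide (v < t)) his q.2.2 : Nat) : Int)) - E.getD t 0),
             pvAdv (fun v => decide (v ≤ t)) los q.2.1,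
             pvAdv (fun v => decide (v < t)) his q.2.2))
          (ans, i0, j0)).1
        = (PySem.List.pyRange a M 1).foldl
            (fun ans t => min ans (2 * P - ((los.countP (fun v => decide (v ≤ t)) : Int)
               - (his.countP (fun v => decide (v < t)) : Int)) - E.getD t 0)) ans := by
  intro n
  induction n with
  | zero =>
      intro a hm i0 j0 ans _ _ _ _
      rw [PySem.List.pyRange_one_eq_nil (by omega)]
      rfl
  | succ n ih =>
      intro a hm i0 j0 ans hi0 hj0 hpre1 hpre2
      have haM : a < M := by omega
      rw [PySem.List.pyRange_one_cons haM]
      simp only [List.foldl_cons]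
      have hi1 : pvAdv (fun v => decide (v ≤ a)) los i0 = los.countP (fun v => decide (v ≤ a)) :=
        pv_adv_eq los hlos (fun v => decide (v ≤ a))
          (fun u v huv h => by simp only [decide_eq_true_eq] at h ⊢; omega)
          (los.length - i0) i0 rfl hi0
          (fun k hk => by simp only [decide_eq_true_eq]; exact le_of_lt (hpre1 k hk))
      have hj1 : pvAdv (fun v => decide (v < a)) his j0 = his.countP (fun v => decide (v < a)) :=
        pv_adv_eq his hhis (fun v => decide (v < a))
          (fun u v huv h => by simp only [decide_eq_true_eq] at h ⊢; omega)
          (his.length - j0) j0 rfl hj0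
          (fun k hk => by simp only [decide_eq_true_eq]; exact hpre2 k hk)
      rw [hi1, hj1]
      apply ih (a + 1) (by omega) _ _ _ List.countP_le_length List.countP_le_length
      · intro k hk
        have := pv_pos_of_lt_countP los hlos (fun v => decide (v ≤ a))
          (fun u v huv h => by simp only [decide_eq_true_eq] at h ⊢; omega) k hk
        simp only [decide_eq_true_eq] at this
        omega
      · intro k hk
        have := pv_pos_of_lt_countP his hhis (fun v => decide (v < a))
          (fun u v huv h => by simp only [decide_eq_true_eq] at h ⊢; omega) k hk
        simp only [decide_eq_true_eq] at this
        omega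

theorem pv_B_eq_canon (N K : Int) (A : List Int) :
    solve_alt N K A = pvCanon N K A := by
  simp only [solve_alt]
  rw [pv_foldB_eq N K A _ PySem.Dict.empty [] []]
  simp only [List.nil_append]
  rw [pv_sweep (2 * K + 1) (PySem.Int.floordiv N 2) _ _ _
        (by simpa using PySem.List.sorted_pairwise _ (fun v : Int => v))
        (by simpa using PySem.List.sorted_pairwise _ (fun v : Int => v))
        ((2 * K + 1) - 2).toNat 2 rfl 0 0 N (Nat.zero_le _) (Nat.zero_le _)
        (fun k hk => absurd hk (Nat.not_lt_zero k))
        (fun k hk => absurd hk (Nat.not_lt_zero k))]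
  simp only [pvCanon, pvPairs]
  apply PySem.List.foldl_congr_mem
  intro acc t _
  have hlosc : (PySem.List.sorted ((List.map (fun i => (PySem.List.pyGetD A i 0, PySem.List.pyGetD A (N - i - 1) 0))
          (PySem.List.pyRange 0 (PySem.Int.floordiv N 2) 1)).map (fun p => min p.1 p.2 + 1)) (fun v => v) false).countP
        (fun v => decide (v ≤ t))
      = (List.map (fun i => (PySem.List.pyGetD A i 0, PySem.List.pyGetD A (N - i - 1) 0))
          (PySem.List.pyRange 0 (PySem.Int.floordiv N 2) 1)).countP (fun p => decide (min p.1 p.2 + 1 ≤ t)) := by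
    rw [(PySem.List.sorted_perm _ _ _).countP_eq, List.countP_map]
    rfl
  have hhisc : (PySem.List.sorted ((List.map (fun i => (PySem.List.pyGetD A i 0, PySem.List.pyGetD A (N - i - 1) 0))
          (PySem.List.pyRange 0 (PySem.Int.floordiv N 2) 1)).map (fun p => max p.1 p.2 + K)) (fun v => v) false).countP
        (fun v => decide (v < t))
      = (List.map (fun i => (PySem.List.pyGetD A i 0, PySem.List.pyGetD A (N - i - 1) 0))
          (PySem.List.pyRange 0 (PySem.Int.floordiv N 2) 1)).countP (fun p => decide (max p.1 p.2 + K + 1 ≤ t)) := by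
    rw [(PySem.List.sorted_perm _ _ _).countP_eq, List.countP_map]
    apply List.countP_congr
    intro p _
    simp only [Function.comp_apply, decide_eq_true_eq]
    omega
  have hwc := pv_wc_count (List.map (fun i => (PySem.List.pyGetD A i 0, PySem.List.pyGetD A (N - i - 1) 0))
      (PySem.List.pyRange 0 (PySem.Int.floordiv N 2) 1)) PySem.Dict.empty t
  rw [hlosc, hhisc, hwc]
  simp

-- ===== VERDICT (by name: the statement is the Claim_ definition above) =====
theorem solve_spec : Claim_equal_solve := by
  intro N K A _ hpre
  unfold Spec_solve
  rw [pv_A_eq_canon N K A hpre, pv_B_eq_canon]
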